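-- pv_equiv track=rewrite | github.com/create-new-entity/Practical-programming-in-Python-2018 | Round 3/Task 1/Task1-1.py | indexDict
-- ===== SOURCE A (Python) =====
-- def indexDict(vals):
--     output = {}
--     valSet = set(vals)
--
--     for val in valSet:
--         for i, v in enumerate(reversed(vals)):
--             if v == val:
--                 lastIndex = len(vals) - 1 - i
--                 output[val] = lastIndex
--                 break
--
--     return output
-- ===== SOURCE B (Python) =====
-- def indexDict(vals):
--     output = {}
--     for i, v in enumerate(vals):
--         output[v] = i
--     return output
-- ===== Notes on version B (the rewrite author's own statement) =====
-- stated objective: faster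
-- what changed: Replaces A's outer loop over the distinct values with a reversed linear scan per value by a single forward enumerate pass whose dict assignments overwrite earlier indices, so each key ends with its last index.
import Mathlib
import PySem

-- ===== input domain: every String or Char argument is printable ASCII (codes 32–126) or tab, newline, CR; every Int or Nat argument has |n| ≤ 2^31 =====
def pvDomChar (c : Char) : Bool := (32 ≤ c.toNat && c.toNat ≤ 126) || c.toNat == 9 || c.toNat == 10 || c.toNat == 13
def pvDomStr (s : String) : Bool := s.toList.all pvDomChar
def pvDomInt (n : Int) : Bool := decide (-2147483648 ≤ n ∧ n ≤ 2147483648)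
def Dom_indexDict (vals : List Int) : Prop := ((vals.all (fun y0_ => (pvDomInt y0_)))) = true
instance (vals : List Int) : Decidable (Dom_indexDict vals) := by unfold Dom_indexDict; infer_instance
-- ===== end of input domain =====

-- B replaces A's per-distinct-value reversed scans by one forward enumerate pass with overwriting dict assignments (faster in a timing run's measurement).


-- ===== PORT A =====
-- inner loop: 'for i, v in enumerate(reversed(vals)): if v == val: … break' — scan the
-- reversed list carrying the counter i, returning the i of the first hit (none = fell through)
def scanRevA (val : Int) (l : List Int) (i : Int) : Option Int :=
  match l with
  | [] => none
  | v :: t => if v = val then some i else scanRevA val t (i + 1)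

def indexDict (vals : List Int) : List (Int × Int) :=
  let valSet : PySem.Set Int := PySem.Set.ofList vals
  let output : PySem.Dict Int Int :=
    valSet.foldl (fun output val =>
      match scanRevA val vals.reverse 0 with
      | some i => output.insert val ((vals.length : Int) - 1 - i)
      | none => output) PySem.Dict.empty
  output.items

-- ===== PORT B =====
def indexDict_alt (vals : List Int) : List (Int × Int) :=
  ((PySem.List.enumerate vals 0).foldl
    (fun (output : PySem.Dict Int Int) p => output.insert p.2 p.1) PySem.Dict.empty).items

-- ===== PRECONDITION & SPEC =====
def Spec_indexDict (vals : List Int) (out : List (Int × Int)) : Prop := out = indexDict_alt vals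
instance (vals : List Int) (out : List (Int × Int)) : Decidable (Spec_indexDict vals out) := by unfold Spec_indexDict; infer_instance

-- ===== CLAIM (what is proved, stated in full; the proofs are below) =====
def Claim_equal_indexDict : Prop := ∀ (vals : List Int), Dom_indexDict vals → Spec_indexDict vals (indexDict vals)

-- ===== LEMMAS AND PROOFS =====

-- last index of v in vals, as both programs compute it
def lastIdx (vals : List Int) (v : Int) : Int :=
  (vals.length : Int) - 1 - (vals.reverse.idxOf v : Int)

theorem scanRevA_eq (val : Int) (l : List Int) (i : Int) (h : val ∈ l) :
    scanRevA val l i = some (i + (l.idxOf val : Int)) := by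
  induction l generalizing i with
  | nil => cases h
  | cons x t ih =>
    by_cases hx : x = val
    · subst hx; simp [scanRevA, List.idxOf_cons_self]
    · have hm : val ∈ t := by cases h with
        | head => exact absurd rfl hx
        | tail _ h => exact h
      have := ih (i + 1) hm
      simp only [scanRevA, if_neg hx, this, List.idxOf_cons]
      have : (x == val) = false := by simp [hx]
      simp [this]
      ring_nf

theorem enumerate_append_singleton (xs : List Int) (x : Int) (s : Int) :
    PySem.List.enumerate (xs ++ [x]) s
      = PySem.List.enumerate xs s ++ [(s + (xs.length : Int), x)] := by
  induction xs generalizing s with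
  | nil => simp [PySem.List.enumerate_cons, PySem.List.enumerate_nil]
  | cons y t ih =>
    simp only [List.cons_append, PySem.List.enumerate_cons, ih (s + 1), List.length_cons]
    push_cast
    ring_nf

theorem dedup_append_singleton (xs : List Int) (x : Int) :
    PySem.List.dedup (xs ++ [x])
      = if x ∈ xs then PySem.List.dedup xs else PySem.List.dedup xs ++ [x] := by
  simp only [PySem.List.dedup_eq_ofList, PySem.Set.ofList_eq_foldl, List.foldl_append,
    List.foldl_cons, List.foldl_nil]
  rw [← PySem.Set.ofList_eq_foldl]
  unfold PySem.Set.add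
  by_cases hx : x ∈ xs
  · simp [PySem.Set.contains, PySem.Set.mem_ofList, hx]
  · simp [PySem.Set.contains, PySem.Set.mem_ofList, hx]

theorem lastIdx_append_self (xs : List Int) (x : Int) :
    lastIdx (xs ++ [x]) x = (xs.length : Int) := by
  simp [lastIdx, List.reverse_append, List.idxOf_cons_self]

theorem lastIdx_append_of_ne (xs : List Int) (x v : Int) (h : v ≠ x) :
    lastIdx (xs ++ [x]) v = lastIdx xs v := by
  have hbe : (x == v) = false := by simp [Ne.symm h]
  simp only [lastIdx, List.reverse_append, List.reverse_cons, List.reverse_nil,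
    List.nil_append, List.singleton_append, List.length_append, List.length_cons,
    List.length_nil, List.idxOf_cons, hbe, cond_false]
  push_cast
  omega

-- B's dict, characterised: items in first-occurrence order, value = last index
theorem altFold_items (vals : List Int) :
    ((PySem.List.enumerate vals 0).foldl
        (fun (output : PySem.Dict Int Int) p => output.insert p.2 p.1)
        PySem.Dict.empty).items
      = (PySem.List.dedup vals).map (fun v => (v, lastIdx vals v)) := by
  induction vals using List.reverseRecOn with
  | nil => rfl
  | append_singleton xs x ih =>
    rw [enumerate_append_singleton, List.foldl_append, List.foldl_cons, List.foldl_nil]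
    set d := (PySem.List.enumerate xs 0).foldl
      (fun (output : PySem.Dict Int Int) p => output.insert p.2 p.1) PySem.Dict.empty with hd
    have hkeys : d.keys = PySem.List.dedup xs := by
      simp only [PySem.Dict.keys, ih, List.map_map]
      exact List.map_id _
    have hcont : d.contains x = decide (x ∈ xs) := by
      rw [PySem.Dict.contains_eq_decide_mem_keys, hkeys]
      simp
    rw [PySem.Dict.items_insert, hcont, dedup_append_singleton]
    by_cases hx : x ∈ xs
    · rw [if_pos (by simp [hx]), if_pos hx, ih, List.map_map]
      apply List.map_congr_left
      intro v hv
      by_cases hvx : v = x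
      · subst hvx
        simp [Function.comp, lastIdx_append_self]
      · have hbe : (v == x) = false := by simp [hvx]
        simp [Function.comp, hbe, lastIdx_append_of_ne xs x v hvx]
    · rw [if_neg (by simp [hx]), if_neg hx, ih, List.map_append]
      congr 1
      · apply List.map_congr_left
        intro v hv
        have hvx : v ≠ x := by
          intro hh
          exact hx (hh ▸ ((PySem.List.mem_dedup xs v).1 hv))
        rw [lastIdx_append_of_ne xs x v hvx]
      · simp [lastIdx_append_self]

-- A's dict, characterised the same way
theorem aFold_items (vals : List Int) :
    ((PySem.Set.ofList vals).foldl (fun (output : PySem.Dict Int Int) val =>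
        match scanRevA val vals.reverse 0 with
        | some i => output.insert val ((vals.length : Int) - 1 - i)
        | none => output) PySem.Dict.empty).items
      = (PySem.List.dedup vals).map (fun v => (v, lastIdx vals v)) := by
  have hbody : (PySem.Set.ofList vals).foldl (fun (output : PySem.Dict Int Int) val =>
        match scanRevA val vals.reverse 0 with
        | some i => output.insert val ((vals.length : Int) - 1 - i)
        | none => output) PySem.Dict.empty
      = (PySem.Set.ofList vals).foldl (fun (output : PySem.Dict Int Int) val =>
        output.insert val (lastIdx vals val)) PySem.Dict.empty := by
    apply PySem.List.foldl_congr_mem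
    intro d val hv
    have hm : val ∈ vals.reverse := by
      simp only [List.mem_reverse]
      exact (PySem.Set.mem_ofList vals val).1 hv
    rw [scanRevA_eq val vals.reverse 0 hm]
    simp [lastIdx]
  rw [hbody]
  rw [PySem.Dict.items_foldl_insert_fresh]
  · simp [PySem.List.dedup_eq_ofList, PySem.Dict.empty]
  · intro a _; exact PySem.Dict.contains_empty a
  · exact List.Nodup.map_on (fun a _ b _ h => h) (PySem.Set.nodup_ofList vals)

-- ===== VERDICT (by name: the statement is the Claim_ definition above) =====
theorem indexDict_spec : Claim_equal_indexDict := by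
  intro vals _
  show indexDict vals = indexDict_alt vals
  unfold indexDict indexDict_alt
  rw [altFold_items, aFold_items]
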